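-- pv_equiv track=rewrite | github.com/poulsbopete/dashboard-alert-migration | mig-to-kbn/observability_migration/adapters/source/grafana/corpus.py | infer_service_name
-- ===== SOURCE A (Python) =====
-- from typing import Any, Optional
--
-- def infer_service_name(metric_name: str, profile: dict[str, Any]) -> str:
--     service_overrides = profile.get("service_name_overrides", {})
--     if metric_name in service_overrides:
--         return str(service_overrides[metric_name])
--     prefixes = [
--         ("alertmanager_", "alertmanager"),
--         ("node_", "node-exporter"),
--         ("nginx_", "nginx-exporter"),
--         ("container_", "cadvisor"),
--         ("otelcol_", "otel-collector"),
--         ("awsotelcol_", "aws-otel-collector"),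
--         ("prometheus_", "prometheus"),
--         ("promhttp_", "prometheus"),
--         ("process_", "system"),
--         ("go_", "go-runtime"),
--     ]
--     for prefix, service in prefixes:
--         if metric_name.startswith(prefix):
--             return service
--     return "synthetic-service"
-- ===== SOURCE B (Python) =====
-- # B: a first-child/next-sibling character trie over the known prefixes, built once
-- # and walked character by character, instead of scanning (prefix, service) pairs
-- # with startswith.  The prefixes are prefix-free, so the walk finds the unique match.
--
-- _FAIL = ("fail",)
--
--
-- def _insert(t, p, s):
--     # nodes: ("fail",) | ("accept", service) | ("branch", ch, child, sibling)
--     if not p: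
--         return ("accept", s)
--     c, rest = p[0], p[1:]
--     if t[0] == "branch":
--         _, tc, child, sib = t
--         if tc == c:
--             return ("branch", tc, _insert(child, rest, s), sib)
--         return ("branch", tc, child, _insert(sib, p, s))
--     return ("branch", c, _insert(_FAIL, rest, s), t)
--
--
-- def _build():
--     # stem -> service; the trie key is the stem followed by the separating underscore
--     t = _FAIL
--     for stem, svc in [
--         ("alertmanager", "alertmanager"),
--         ("node", "node-exporter"),
--         ("nginx", "nginx-exporter"),
--         ("container", "cadvisor"),
--         ("otelcol", "otel-collector"),
--         ("awsotelcol", "aws-otel-collector"),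
--         ("prometheus", "prometheus"),
--         ("promhttp", "prometheus"),
--         ("process", "system"),
--         ("go", "go-runtime"),
--     ]:
--         t = _insert(t, stem + "_", svc)
--     return t
--
--
-- _TRIE = _build()
--
--
-- def _walk(t, text):
--     i = 0
--     while True:
--         tag = t[0]
--         if tag == "fail":
--             return None
--         if tag == "accept":
--             return t[1]
--         if i >= len(text):
--             return None
--         if text[i] == t[1]:
--             t, i = t[2], i + 1
--         else:
--             t = t[3]
--
--
-- def infer_service_name(metric_name: str, profile: dict) -> str:
--     service_overrides = profile.get("service_name_overrides", {})
--     if metric_name in service_overrides: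
--         return str(service_overrides[metric_name])
--     svc = _walk(_TRIE, metric_name)
--     return svc if svc is not None else "synthetic-service"
-- ===== Notes on version B (the rewrite author's own statement) =====
-- stated objective: alternative
-- what changed: Replaced the linear startswith scan over ten (prefix, service) pairs by a first-child/next-sibling character trie built once from the prefixes and walked character by character; correctness rests on the prefix set being prefix-free, so the trie walk finds the same unique match.
import Mathlib
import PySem

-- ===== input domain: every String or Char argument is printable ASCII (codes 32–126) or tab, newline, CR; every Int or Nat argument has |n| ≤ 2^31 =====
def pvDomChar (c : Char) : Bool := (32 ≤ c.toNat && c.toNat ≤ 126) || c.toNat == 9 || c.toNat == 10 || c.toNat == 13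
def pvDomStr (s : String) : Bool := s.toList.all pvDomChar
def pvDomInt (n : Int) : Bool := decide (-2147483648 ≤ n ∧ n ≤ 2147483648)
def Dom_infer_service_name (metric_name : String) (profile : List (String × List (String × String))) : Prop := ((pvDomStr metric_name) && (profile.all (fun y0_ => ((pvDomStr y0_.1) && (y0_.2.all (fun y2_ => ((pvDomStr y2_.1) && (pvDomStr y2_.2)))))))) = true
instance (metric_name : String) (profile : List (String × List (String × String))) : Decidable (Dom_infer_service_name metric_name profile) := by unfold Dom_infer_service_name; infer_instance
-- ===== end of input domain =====

-- B replaces A's linear startswith scan over the ten (prefix, service) pairs by a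
-- first-child/next-sibling character trie built once from the prefixes and walked
-- character by character (objective: alternative; same return value everywhere).

-- ===== PORT A =====
def pvPrefixesA : List (String × String) :=
  [("alertmanager_", "alertmanager"), ("node_", "node-exporter"), ("nginx_", "nginx-exporter"),
   ("container_", "cadvisor"), ("otelcol_", "otel-collector"), ("awsotelcol_", "aws-otel-collector"),
   ("prometheus_", "prometheus"), ("promhttp_", "prometheus"), ("process_", "system"),
   ("go_", "go-runtime")]

-- A's 'for prefix, service in prefixes: if metric_name.startswith(prefix): return service' loop
def pvLoopA (metric_name : String) : List (String × String) → String
  | [] => "synthetic-service"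
  | (p, s) :: rest => if PySem.Str.startswith metric_name p then s else pvLoopA metric_name rest

def infer_service_name (metric_name : String) (profile : List (String × List (String × String))) : String :=
  let service_overrides : PySem.Dict String String :=
    PySem.Dict.mk ((PySem.Dict.mk profile).getD "service_name_overrides" [])
  if service_overrides.contains metric_name then
    match service_overrides.get? metric_name with
    | some v => v          -- str(v) on a str is v itself
    | none => ""           -- unreachable: guarded by contains
  else
    pvLoopA metric_name pvPrefixesA

-- ===== PORT B =====
-- first-child/next-sibling trie nodes, as in Source B
inductive PvTrie
  | fail
  | accept (s : String)
  | branch (c : Char) (child sib : PvTrie)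
deriving DecidableEq, Repr

-- Source B's _insert
def pvInsert : PvTrie → List Char → String → PvTrie
  | _, [], s => PvTrie.accept s
  | PvTrie.branch tc child sib, c :: rest, s =>
      if tc = c then PvTrie.branch tc (pvInsert child rest s) sib
      else PvTrie.branch tc child (pvInsert sib (c :: rest) s)
  | t, c :: rest, s => PvTrie.branch c (pvInsert PvTrie.fail rest s) t
termination_by t p _ => (p.length, sizeOf t)

-- Source B's stem -> service table
def pvStemsB : List (String × String) :=
  [("alertmanager", "alertmanager"), ("node", "node-exporter"), ("nginx", "nginx-exporter"),
   ("container", "cadvisor"), ("otelcol", "otel-collector"), ("awsotelcol", "aws-otel-collector"),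
   ("prometheus", "prometheus"), ("promhttp", "prometheus"), ("process", "system"),
   ("go", "go-runtime")]

-- Source B's _build: fold _insert of stem + "_" over the table, starting from the fail node
def pvTrie : PvTrie :=
  pvStemsB.foldl (fun t ps => pvInsert t (ps.1 ++ "_").toList ps.2) PvTrie.fail

-- Source B's _walk (the while loop over (node, index) becomes structural recursion on the node)
def pvWalk : PvTrie → List Char → Option String
  | PvTrie.fail, _ => none
  | PvTrie.accept s, _ => some s
  | PvTrie.branch _ _ _, [] => none
  | PvTrie.branch c child sib, d :: cs =>
      if d = c then pvWalk child cs else pvWalk sib (d :: cs)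

def infer_service_name_alt (metric_name : String) (profile : List (String × List (String × String))) : String :=
  let service_overrides : PySem.Dict String String :=
    PySem.Dict.mk ((PySem.Dict.mk profile).getD "service_name_overrides" [])
  if service_overrides.contains metric_name then
    match service_overrides.get? metric_name with
    | some v => v          -- str(v) on a str is v itself
    | none => ""           -- unreachable: guarded by contains
  else
    match pvWalk pvTrie metric_name.toList with
    | some svc => svc
    | none => "synthetic-service"

-- ===== PRECONDITION & SPEC =====
def Spec_infer_service_name (metric_name : String) (profile : List (String × List (String × String))) (out : String) : Prop := out = infer_service_name_alt metric_name profile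
instance (metric_name : String) (profile : List (String × List (String × String))) (out : String) : Decidable (Spec_infer_service_name metric_name profile out) := by unfold Spec_infer_service_name; infer_instance

-- ===== CLAIM (what is proved, stated in full; the proofs are below) =====
def Claim_equal_infer_service_name : Prop := ∀ (metric_name : String) (profile : List (String × List (String × String))), Dom_infer_service_name metric_name profile → Spec_infer_service_name metric_name profile (infer_service_name metric_name profile)

-- ===== LEMMAS AND PROOFS =====

-- the set of patterns a trie accepts
def pvDenote : PvTrie → List (List Char × String)
  | PvTrie.fail => []
  | PvTrie.accept s => [([], s)]
  | PvTrie.branch c child sib =>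
      (pvDenote child).map (fun x => (c :: x.1, x.2)) ++ pvDenote sib

-- characters labelling a sibling chain
def pvChainChars : PvTrie → List Char
  | PvTrie.branch c _ sib => c :: pvChainChars sib
  | _ => []

-- well-formedness: accept only in child position (flag true), distinct sibling chars
def pvWfB : Bool → PvTrie → Bool
  | _, PvTrie.fail => true
  | b, PvTrie.accept _ => b
  | _, PvTrie.branch c child sib =>
      !(pvChainChars sib).contains c && pvWfB true child && pvWfB false sib

lemma pvHeads : ∀ (t : PvTrie) (p : List Char) (s : String),
    pvWfB false t = true → (p, s) ∈ pvDenote t → ∃ d p', p = d :: p' ∧ d ∈ pvChainChars t := by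
  intro t
  induction t with
  | fail => intro p s _ hm; simp [pvDenote] at hm
  | accept s' => intro p s hw _; simp [pvWfB] at hw
  | branch c child sib ihc ihs =>
    intro p s hw hm
    simp only [pvWfB, Bool.and_eq_true, Bool.not_eq_true'] at hw
    simp only [pvDenote, List.mem_append, List.mem_map] at hm
    rcases hm with ⟨x, _, hx⟩ | hm
    · obtain ⟨h1, h2⟩ := Prod.mk.injEq .. ▸ hx
      exact ⟨c, x.1, h1.symm, by simp [pvChainChars]⟩
    · obtain ⟨d, p', hp, hd⟩ := ihs p s hw.2 hm
      exact ⟨d, p', hp, by simp [pvChainChars, hd]⟩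

lemma pvComplete : ∀ (t : PvTrie) (b : Bool) (p : List Char) (s : String) (cs : List Char),
    pvWfB b t = true → (p, s) ∈ pvDenote t → p <+: cs → ∃ s', pvWalk t cs = some s' := by
  intro t
  induction t with
  | fail => intro b p s cs _ hm _; simp [pvDenote] at hm
  | accept s' => intro b p s cs _ _ _; exact ⟨s', rfl⟩
  | branch c child sib ihc ihs =>
    intro b p s cs hw hm hpre
    simp only [pvWfB, Bool.and_eq_true, Bool.not_eq_true'] at hw
    obtain ⟨⟨hc, hwc⟩, hws⟩ := hw
    simp only [pvDenote, List.mem_append, List.mem_map] at hm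
    rcases hm with ⟨x, hx, hxe⟩ | hm
    · obtain ⟨hp, hs⟩ := Prod.mk.injEq .. ▸ hxe
      obtain ⟨u, hu⟩ := hpre
      subst hp
      subst hu
      simp only [List.cons_append, pvWalk, ite_true]
      exact ihc true x.1 x.2 (x.1 ++ u) hwc (by simpa using hx) ⟨u, rfl⟩
    · obtain ⟨d, p', hp, hd⟩ := pvHeads sib p s hws hm
      subst hp
      obtain ⟨u, hu⟩ := hpre
      subst hu
      have hne : d ≠ c := by
        intro h; subst h
        rw [List.contains_eq_mem] at hc
        simp [hd] at hc
      simp only [List.cons_append, pvWalk, if_neg hne]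
      exact ihs false (d :: p') s (d :: (p' ++ u)) hws hm ⟨u, by simp⟩

lemma pvSound : ∀ (t : PvTrie) (cs : List Char) (s : String),
    pvWalk t cs = some s → ∃ p, (p, s) ∈ pvDenote t ∧ p <+: cs := by
  intro t
  induction t with
  | fail => intro cs s h; simp [pvWalk] at h
  | accept s' => intro cs s h
                 simp only [pvWalk, Option.some.injEq] at h
                 exact ⟨[], by simp [pvDenote, h], List.nil_prefix⟩
  | branch c child sib ihc ihs =>
    intro cs s h
    cases cs with
    | nil => simp [pvWalk] at h
    | cons d cs' =>
      by_cases hdc : d = c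
      · subst hdc
        rw [pvWalk, if_pos rfl] at h
        obtain ⟨p, hm, hpre⟩ := ihc cs' s h
        refine ⟨d :: p, ?_, ?_⟩
        · simp only [pvDenote, List.mem_append, List.mem_map]
          exact Or.inl ⟨(p, s), hm, rfl⟩
        · exact (List.cons_prefix_cons).mpr ⟨rfl, hpre⟩
      · rw [pvWalk, if_neg hdc] at h
        obtain ⟨p, hm, hpre⟩ := ihs (d :: cs') s h
        exact ⟨p, by simp [pvDenote, hm], hpre⟩

-- pvInsert is defined by well-founded recursion, so 'decide' cannot unfold the
-- foldl that builds pvTrie; evaluate it once by simp into a literal tree.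
lemma pvTrie_eval : pvTrie = PvTrie.branch 'a' (PvTrie.branch 'l' (PvTrie.branch 'e' (PvTrie.branch 'r' (PvTrie.branch 't' (PvTrie.branch 'm' (PvTrie.branch 'a' (PvTrie.branch 'n' (PvTrie.branch 'a' (PvTrie.branch 'g' (PvTrie.branch 'e' (PvTrie.branch 'r' (PvTrie.branch '_' (PvTrie.accept "alertmanager") (PvTrie.fail)) (PvTrie.fail)) (PvTrie.fail)) (PvTrie.fail)) (PvTrie.fail)) (PvTrie.fail)) (PvTrie.fail)) (PvTrie.fail)) (PvTrie.fail)) (PvTrie.fail)) (PvTrie.fail)) (PvTrie.branch 'w' (PvTrie.branch 's' (PvTrie.branch 'o' (PvTrie.branch 't' (PvTrie.branch 'e' (PvTrie.branch 'l' (PvTrie.branch 'c' (PvTrie.branch 'o' (PvTrie.branch 'l' (PvTrie.branch '_' (PvTrie.accept "aws-otel-collector") (PvTrie.fail)) (PvTrie.fail)) (PvTrie.fail)) (PvTrie.fail)) (PvTrie.fail)) (PvTrie.fail)) (PvTrie.fail)) (PvTrie.fail)) (PvTrie.fail)) (PvTrie.fail))) (PvTrie.branch 'n' (PvTrie.branch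 'o' (PvTrie.branch 'd' (PvTrie.branch 'e' (PvTrie.branch '_' (PvTrie.accept "node-exporter") (PvTrie.fail)) (PvTrie.fail)) (PvTrie.fail)) (PvTrie.branch 'g' (PvTrie.branch 'i' (PvTrie.branch 'n' (PvTrie.branch 'x' (PvTrie.branch '_' (PvTrie.accept "nginx-exporter") (PvTrie.fail)) (PvTrie.fail)) (PvTrie.fail)) (PvTrie.fail)) (PvTrie.fail))) (PvTrie.branch 'c' (PvTrie.branch 'o' (PvTrie.branch 'n' (PvTrie.branch 't' (PvTrie.branch 'a' (PvTrie.branch 'i' (PvTrie.branch 'n' (PvTrie.branch 'e' (PvTrie.branch 'r' (PvTrie.branch '_' (PvTrie.accept "cadvisor") (PvTrie.fail)) (PvTrie.fail)) (PvTrie.fail)) (PvTrie.fail)) (PvTrie.fail)) (PvTrie.fail)) (PvTrie.fail)) (PvTrie.fail)) (PvTrie.fail)) (PvTrie.branch 'o' (PvTrie.branch 't' (PvTrie.branch 'e' (PvTrie.branch 'l' (PvTrie.branch 'c' (PvTrie.branch 'o' (PvTrie.branch 'l' (PvTrie.branch '_' (PvTrie.accept "otel-collector") (PvTrie.fail)) (PvTrie.fail))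 (PvTrie.fail)) (PvTrie.fail)) (PvTrie.fail)) (PvTrie.fail)) (PvTrie.fail)) (PvTrie.branch 'p' (PvTrie.branch 'r' (PvTrie.branch 'o' (PvTrie.branch 'm' (PvTrie.branch 'e' (PvTrie.branch 't' (PvTrie.branch 'h' (PvTrie.branch 'e' (PvTrie.branch 'u' (PvTrie.branch 's' (PvTrie.branch '_' (PvTrie.accept "prometheus") (PvTrie.fail)) (PvTrie.fail)) (PvTrie.fail)) (PvTrie.fail)) (PvTrie.fail)) (PvTrie.fail)) (PvTrie.branch 'h' (PvTrie.branch 't' (PvTrie.branch 't' (PvTrie.branch 'p' (PvTrie.branch '_' (PvTrie.accept "prometheus") (PvTrie.fail)) (PvTrie.fail)) (PvTrie.fail)) (PvTrie.fail)) (PvTrie.fail))) (PvTrie.branch 'c' (PvTrie.branch 'e' (PvTrie.branch 's' (PvTrie.branch 's' (PvTrie.branch '_' (PvTrie.accept "system") (PvTrie.fail)) (PvTrie.fail)) (PvTrie.fail)) (PvTrie.fail)) (PvTrie.fail))) (PvTrie.fail)) (PvTrie.fail)) (PvTrie.branch 'g' (PvTrie.branch 'o' (PvTrie.branch '_' (PvTrie.accept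 "go-runtime") (PvTrie.fail)) (PvTrie.fail)) (PvTrie.fail)))))) := by
  simp [pvTrie, pvStemsB, pvInsert]

-- concrete facts about the literal trie
lemma pvTrie_wf : pvWfB false pvTrie = true := by rw [pvTrie_eval]; decide

-- denote lists the patterns in trie order, a permutation of A's list
lemma pvTrie_perm : (pvDenote pvTrie).Perm (pvPrefixesA.map (fun x => (x.1.toList, x.2))) := by
  rw [pvTrie_eval]; decide

lemma pvTrie_pf : ∀ x ∈ pvDenote pvTrie, ∀ y ∈ pvDenote pvTrie, x.1 <+: y.1 → x = y := by rw [pvTrie_eval]; decide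

-- startswith ↔ list prefix
lemma pvStartswith_iff (name p : String) :
    PySem.Str.startswith name p = true ↔ p.toList <+: name.toList := by
  rw [PySem.Str.startswith_eq]
  exact PySem.Chars.startswith_iff _ _

-- A's loop when nothing matches
lemma pvLoopA_none (name : String) (l : List (String × String))
    (h : ∀ x ∈ l, ¬ x.1.toList <+: name.toList) :
    pvLoopA name l = "synthetic-service" := by
  induction l with
  | nil => rfl
  | cons hd tl ih =>
    obtain ⟨p, s⟩ := hd
    have hf : PySem.Str.startswith name p = false := by
      rw [Bool.eq_false_iff]
      intro hb
      exact h (p, s) (by simp) ((pvStartswith_iff name p).mp hb)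
    simp only [pvLoopA, hf, Bool.false_eq_true, if_false]
    exact ih (fun x hx => h x (by simp [hx]))

-- A's loop when a unique pattern matches
lemma pvLoopA_match (name : String) (l : List (String × String)) (p : List Char) (s : String)
    (hmem : (p, s) ∈ l.map (fun x => (x.1.toList, x.2)))
    (hpre : p <+: name.toList)
    (huniq : ∀ q t, (q, t) ∈ l.map (fun x => (x.1.toList, x.2)) → q <+: name.toList → q = p ∧ t = s) :
    pvLoopA name l = s := by
  induction l with
  | nil => simp at hmem
  | cons hd tl ih =>
    obtain ⟨q0, t0⟩ := hd
    by_cases hsw : PySem.Str.startswith name q0 = true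
    · have := huniq q0.toList t0 (by simp) ((pvStartswith_iff name q0).mp hsw)
      simp only [pvLoopA, hsw, if_true]
      exact this.2
    · simp only [pvLoopA, hsw]
      have hq0 : ¬ q0.toList <+: name.toList := fun h => hsw ((pvStartswith_iff name q0).mpr h)
      rw [List.map_cons] at hmem
      have hmem' : (p, s) ∈ tl.map (fun x => (x.1.toList, x.2)) := by
        rcases List.mem_cons.mp hmem with h | h
        · have hpq : p = q0.toList := (Prod.ext_iff.mp h).1
          exact absurd (hpq ▸ hpre) hq0
        · exact h
      refine ih hmem' (fun q t hq hqp => huniq q t ?_ hqp)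
      rw [List.map_cons]
      exact List.mem_cons_of_mem _ hq

theorem infer_service_name_spec : Claim_equal_infer_service_name := by
  intro metric_name profile _
  unfold Spec_infer_service_name infer_service_name infer_service_name_alt
  by_cases hc : (PySem.Dict.mk ((PySem.Dict.mk profile).getD "service_name_overrides" [])).contains metric_name = true
  · simp only [hc, if_true]
  · rw [if_neg hc, if_neg hc]
    cases hw : pvWalk pvTrie metric_name.toList with
    | none =>
      have hno : ∀ x ∈ pvPrefixesA, ¬ x.1.toList <+: metric_name.toList := by
        intro x hx hpre
        have hm : (x.1.toList, x.2) ∈ pvDenote pvTrie :=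
          pvTrie_perm.mem_iff.mpr (List.mem_map.mpr ⟨x, hx, rfl⟩)
        obtain ⟨s', hs'⟩ := pvComplete pvTrie false x.1.toList x.2 metric_name.toList pvTrie_wf hm hpre
        rw [hw] at hs'; exact absurd hs' (by simp)
      rw [pvLoopA_none metric_name pvPrefixesA hno]
    | some s =>
      obtain ⟨p, hmem, hpre⟩ := pvSound pvTrie metric_name.toList s hw
      have hmem' : (p, s) ∈ pvPrefixesA.map (fun x => (x.1.toList, x.2)) := pvTrie_perm.mem_iff.mp hmem
      have huniq : ∀ q t, (q, t) ∈ pvPrefixesA.map (fun x => (x.1.toList, x.2)) → q <+: metric_name.toList → q = p ∧ t = s := by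
        intro q t hq hqp
        have hqd : (q, t) ∈ pvDenote pvTrie := pvTrie_perm.mem_iff.mpr hq
        rcases List.prefix_or_prefix_of_prefix hqp hpre with h | h
        · have := pvTrie_pf (q, t) hqd (p, s) hmem h
          exact ⟨congrArg Prod.fst this, congrArg Prod.snd this⟩
        · have := pvTrie_pf (p, s) hmem (q, t) hqd h
          exact ⟨(congrArg Prod.fst this).symm, (congrArg Prod.snd this).symm⟩
      rw [pvLoopA_match metric_name pvPrefixesA p s hmem' hpre huniq]
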